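-- pv_equiv track=rewrite | github.com/NichiporukRoman/BSU-Projects | 6th-Term/Neural-Net/Lab_3/Lab_3.1/Task_2/task.py | check_previous_numbers
-- ===== SOURCE A (Python) =====
-- def check_previous_numbers(input_string_):
--     numbers = input_string_.split()
--     seen_numbers = {}
--     results_ = []
--
--     for number in numbers:
--         if number in seen_numbers:
--             results_.append("YES")
--         else:
--             results_.append("NO")
--             seen_numbers[number] = True
--
--     return results_
-- ===== SOURCE B (Python) =====
-- def check_previous_numbers(input_string_):
--     numbers = input_string_.split()
--     remaining = {}
--     for num in numbers:
--         remaining[num] = remaining.get(num, 0) + 1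
--     out = []
--     for num in reversed(numbers):
--         c = remaining.get(num, 0) - 1
--         remaining[num] = c
--         out.append("NO" if c == 0 else "YES")
--     out.reverse()
--     return out
-- ===== Notes on version B (the rewrite author's own statement) =====
-- stated objective: alternative
-- what changed: Replaces the forward seen-set pass with a two-stage counting algorithm: first count all occurrences of each token, then traverse the tokens in reverse decrementing counts, so a token is marked unseen exactly when its remaining count reaches zero (it is the first occurrence), building the output back-to-front.
import Mathlib
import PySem

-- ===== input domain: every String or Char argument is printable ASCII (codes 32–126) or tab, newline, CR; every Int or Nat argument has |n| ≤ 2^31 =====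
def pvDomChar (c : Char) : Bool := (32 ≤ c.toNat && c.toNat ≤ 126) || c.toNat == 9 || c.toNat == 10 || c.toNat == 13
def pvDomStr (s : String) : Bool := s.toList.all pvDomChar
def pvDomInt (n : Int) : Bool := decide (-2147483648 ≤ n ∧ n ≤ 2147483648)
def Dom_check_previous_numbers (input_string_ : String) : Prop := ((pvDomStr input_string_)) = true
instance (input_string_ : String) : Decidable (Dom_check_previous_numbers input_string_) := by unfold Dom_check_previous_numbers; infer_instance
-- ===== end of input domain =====

-- B replaces A's forward seen-set pass with a two-stage counting algorithm (count all tokens,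
-- then a reverse pass decrementing counts, building output back-to-front); same cost, alternative structure.

-- ===== PORT A =====
def check_previous_numbers (input_string_ : String) : List String :=
  let numbers := PySem.Str.split₀ input_string_
  (numbers.foldl
    (fun (st : PySem.Dict String Bool × List String) number =>
      if st.1.contains number then (st.1, st.2 ++ ["YES"])
      else (st.1.insert number true, st.2 ++ ["NO"]))
    (PySem.Dict.empty, [])).2

-- ===== PORT B =====
def check_previous_numbers_alt (input_string_ : String) : List String :=
  let numbers := PySem.Str.split₀ input_string_
  let remaining : PySem.Dict String Int :=
    numbers.foldl (fun d num => d.insert num (d.getD num 0 + 1)) PySem.Dict.empty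
  let out :=
    (numbers.reverse.foldl
      (fun (st : PySem.Dict String Int × List String) num =>
        let c := st.1.getD num 0 - 1
        (st.1.insert num c, st.2 ++ [if c == 0 then "NO" else "YES"]))
      (remaining, [])).2
  out.reverse

-- ===== PRECONDITION & SPEC =====
def Spec_check_previous_numbers (input_string_ : String) (out : List String) : Prop := out = check_previous_numbers_alt input_string_
instance (input_string_ : String) (out : List String) : Decidable (Spec_check_previous_numbers input_string_ out) := by unfold Spec_check_previous_numbers; infer_instance

-- ===== CLAIM (what is proved, stated in full; the proofs are below) =====
def Claim_equal_check_previous_numbers : Prop := ∀ (input_string_ : String), Dom_check_previous_numbers input_string_ → Spec_check_previous_numbers input_string_ (check_previous_numbers input_string_)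

-- ===== LEMMAS AND PROOFS =====

/-- Common specification: verdict for each token given the tokens already seen. -/
def pvGo : List String → List String → List String
  | _, [] => []
  | pre, x :: xs => (if x ∈ pre then "YES" else "NO") :: pvGo (pre ++ [x]) xs

lemma pvGo_snoc (pre l : List String) (x : String) :
    pvGo pre (l ++ [x]) = pvGo pre l ++ [if x ∈ pre ++ l then "YES" else "NO"] := by
  induction l generalizing pre with
  | nil => simp [pvGo]
  | cons y ys ih =>
    simp [pvGo, ih (pre ++ [y])]

lemma pvA_loop (l : List String) (d : PySem.Dict String Bool) (acc pre : List String)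
    (hinv : ∀ x, d.contains x = true ↔ x ∈ pre) :
    (l.foldl
      (fun (st : PySem.Dict String Bool × List String) number =>
        if st.1.contains number then (st.1, st.2 ++ ["YES"])
        else (st.1.insert number true, st.2 ++ ["NO"]))
      (d, acc)).2 = acc ++ pvGo pre l := by
  induction l generalizing d acc pre with
  | nil => simp [pvGo]
  | cons x xs ih =>
    by_cases h : d.contains x = true
    · have hx : x ∈ pre := (hinv x).1 h
      simp only [List.foldl_cons, h, if_true]
      rw [ih d (acc ++ ["YES"]) (pre ++ [x])
        (by intro y; rw [hinv y]; simp [List.mem_append]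
            intro hy; subst hy; exact hx)]
      simp [pvGo, hx]
    · have hx : x ∉ pre := fun hm => h ((hinv x).2 hm)
      have h' : d.contains x = false := by simpa using h
      simp only [List.foldl_cons, h', Bool.false_eq_true, if_false]
      rw [ih (d.insert x true) (acc ++ ["NO"]) (pre ++ [x])
        (by intro y
            rw [PySem.Dict.contains_insert]
            simp only [Bool.or_eq_true, beq_iff_eq, hinv y, List.mem_append,
              List.mem_singleton]
            tauto)]
      simp only [pvGo, if_neg hx, List.append_assoc, List.singleton_append]

lemma pvB_loop (m : List String) (r : PySem.Dict String Int) (acc : List String)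
    (hinv : ∀ x, r.getD x 0 = (m.count x : Int)) :
    (m.foldl
      (fun (st : PySem.Dict String Int × List String) num =>
        let c := st.1.getD num 0 - 1
        (st.1.insert num c, st.2 ++ [if c == 0 then "NO" else "YES"]))
      (r, acc)).2 = acc ++ (pvGo [] m.reverse).reverse := by
  induction m generalizing r acc with
  | nil => simp [pvGo]
  | cons x xs ih =>
    simp only [List.foldl_cons]
    have hx : r.getD x 0 - 1 = (xs.count x : Int) := by
      rw [hinv x]; simp
    rw [ih (r.insert x (r.getD x 0 - 1)) _
      (by intro y
          rw [PySem.Dict.getD_insert]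
          by_cases hy : y = x
          · subst hy; simpa using hx
          · rw [if_neg hy, hinv y]
            have hxy : x ≠ y := fun h => hy h.symm
            simp [hxy])]
    have hmem : (xs.count x : Int) = 0 ↔ x ∉ xs.reverse := by
      simp [List.count_eq_zero]
    rw [List.reverse_cons, pvGo_snoc [] xs.reverse x]
    simp only [List.nil_append, List.reverse_append, List.reverse_singleton,
      List.singleton_append, List.append_assoc]
    congr 2
    rw [hx]
    by_cases hm : x ∈ xs.reverse
    · have hne : (xs.count x : Int) ≠ 0 := fun h => (hmem.mp h) hm
      rw [if_pos hm, if_neg (by simpa using hne)]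
    · rw [if_neg hm, if_pos (by simpa using hmem.mpr hm)]

-- ===== VERDICT (by name: the statement is the Claim_ definition above) =====
theorem check_previous_numbers_spec : Claim_equal_check_previous_numbers := by
  intro s _
  unfold Spec_check_previous_numbers check_previous_numbers check_previous_numbers_alt
  dsimp only
  rw [pvA_loop _ _ _ [] (by simp [PySem.Dict.contains_empty])]
  rw [PySem.Dict.foldl_insert_getD_add_one_eq_counter]
  rw [pvB_loop _ _ _ (by intro x; simp [PySem.Dict.getD_counter])]
  simp
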